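-- pv_equiv track=rewrite | github.com/krzysztof-turowski/programming-contests | facebook-hacker-cup/2022-round-1/watering_well_chapter_1.py | solve
-- ===== SOURCE A (Python) =====
-- MOD = 1000000007
--
-- def solve(A, X):
--     out = len(X) * sum(
--         ((X[0][0] - a[0]) ** 2 + (X[0][1] - a[1]) ** 2 for a in A)) % MOD
--     HA, VA = sum(a[0] for a in A), sum(a[1] for a in A)
--     for i, (u, v) in enumerate(zip(X, X[1:]), start = 1):
--         out += (len(X) - i) * (
--             len(A) * (v[0] ** 2 - u[0] ** 2 + v[1] ** 2 - u[1] ** 2)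
--                 - 2 * (v[0] - u[0]) * HA - 2 * (v[1] - u[1]) * VA) % MOD
--     return out % MOD
-- ===== SOURCE B (Python) =====
-- MOD = 1000000007
--
-- def solve(A, X):
--     HA = VA = Q = 0
--     for (ax, ay) in A:
--         HA += ax
--         VA += ay
--         Q += ax * ax + ay * ay
--     n = len(A)
--     total = 0
--     for (x, y) in X:
--         total += (n * (x * x + y * y) - 2 * x * HA - 2 * y * VA + Q)
--     return total % MOD
-- ===== Notes on version B (the rewrite author's own statement) =====
-- stated objective: simpler
-- what changed: Replaces A's anchor-well-plus-telescoping over consecutive well pairs (out = n*S(X[0]) plus weighted consecutive differences, each reduced mod MOD) by one precomputation of sum-x, sum-y and sum-of-squares over A followed by an independent closed-form contribution per well, with a single final mod.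
import Mathlib
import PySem

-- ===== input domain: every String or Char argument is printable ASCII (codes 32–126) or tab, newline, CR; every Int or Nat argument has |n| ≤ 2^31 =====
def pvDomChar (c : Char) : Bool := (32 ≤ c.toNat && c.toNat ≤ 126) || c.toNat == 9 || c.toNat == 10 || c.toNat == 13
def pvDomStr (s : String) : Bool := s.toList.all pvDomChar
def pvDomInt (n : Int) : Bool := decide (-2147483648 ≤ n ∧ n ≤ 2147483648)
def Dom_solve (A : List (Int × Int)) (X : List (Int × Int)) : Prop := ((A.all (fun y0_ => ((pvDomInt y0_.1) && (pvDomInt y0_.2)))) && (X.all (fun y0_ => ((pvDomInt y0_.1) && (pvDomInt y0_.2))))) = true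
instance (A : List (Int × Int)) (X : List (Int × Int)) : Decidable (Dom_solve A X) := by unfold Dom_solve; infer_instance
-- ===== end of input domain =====

-- B replaces A's anchor-plus-telescoping over consecutive well pairs by independent
-- per-well closed-form contributions from precomputed sums over A (objective: simpler).


-- ===== PORT A =====
def MOD : Int := 1000000007

-- the 'for i, (u, v) in enumerate(zip(X, X[1:]), start = 1)' loop: state = (out, i)
def solveLoop (N nA HA VA : Int) : List ((Int × Int) × (Int × Int)) → Int × Int → Int × Int
  | [], st => st
  | uv :: rest, st =>
      solveLoop N nA HA VA rest
        (st.1 + PySem.Int.mod ((N - st.2) *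
            (nA * (uv.2.1 ^ 2 - uv.1.1 ^ 2 + uv.2.2 ^ 2 - uv.1.2 ^ 2)
              - 2 * (uv.2.1 - uv.1.1) * HA - 2 * (uv.2.2 - uv.1.2) * VA)) MOD,
          st.2 + 1)

def solve (A : List (Int × Int)) (X : List (Int × Int)) : Int :=
  -- X[0] is only reached when Python evaluates it (A ≠ []); pyGetD's default is outside Pre_
  let x0 := PySem.List.pyGetD X 0 (0, 0)
  let out0 := PySem.Int.mod (PySem.List.len X *
      (A.map (fun a => (x0.1 - a.1) ^ 2 + (x0.2 - a.2) ^ 2)).sum) MOD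
  let HA := (A.map (fun a => a.1)).sum
  let VA := (A.map (fun a => a.2)).sum
  -- X[1:] = X.tail
  let out := (solveLoop (PySem.List.len X) (PySem.List.len A) HA VA (X.zip X.tail) (out0, 1)).1
  PySem.Int.mod out MOD

-- ===== PORT B =====
def solve_alt (A : List (Int × Int)) (X : List (Int × Int)) : Int :=
  let hvq := A.foldl (fun (s : Int × Int × Int) a =>
    (s.1 + a.1, s.2.1 + a.2, s.2.2 + a.1 * a.1 + a.2 * a.2)) (0, 0, 0)
  let n := PySem.List.len A
  let total := X.foldl (fun t x =>
    t + (n * (x.1 * x.1 + x.2 * x.2) - 2 * x.1 * hvq.1 - 2 * x.2 * hvq.2.1 + hvq.2.2)) 0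
  PySem.Int.mod total MOD

-- ===== PRECONDITION & SPEC =====
-- Pre_ excludes exactly the inputs where A raises IndexError: X = [] with A ≠ [] (X[0] is evaluated).
def Pre_solve (A : List (Int × Int)) (X : List (Int × Int)) : Prop := X ≠ [] ∨ A = []
instance (A : List (Int × Int)) (X : List (Int × Int)) : Decidable (Pre_solve A X) := by unfold Pre_solve; infer_instance
def pvWitness_solve : (List (Int × Int)) × (List (Int × Int)) := ([(1, 2)], [(0, 0), (3, 4)])

def Spec_solve (A : List (Int × Int)) (X : List (Int × Int)) (out : Int) : Prop := out = solve_alt A X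
instance (A : List (Int × Int)) (X : List (Int × Int)) (out : Int) : Decidable (Spec_solve A X out) := by unfold Spec_solve; infer_instance

-- ===== CLAIM (what is proved, stated in full; the proofs are below) =====
def Claim_equal_solve : Prop := ∀ (A : List (Int × Int)) (X : List (Int × Int)), Dom_solve A X → Pre_solve A X → Spec_solve A X (solve A X)

-- ===== LEMMAS AND PROOFS =====

-- per-well linear part (a function of the precomputed sums)
def fl (nA HA VA : Int) (x : Int × Int) : Int := nA * (x.1 ^ 2 + x.2 ^ 2) - 2 * x.1 * HA - 2 * x.2 * VA

def QA (A : List (Int × Int)) : Int := (A.map (fun a => a.1 * a.1 + a.2 * a.2)).sum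

-- expansion of the squared-distance sum over A
theorem expand_sum (A : List (Int × Int)) (x : Int × Int) :
    (A.map (fun a => (x.1 - a.1) ^ 2 + (x.2 - a.2) ^ 2)).sum
      = fl (A.length : Int) ((A.map (fun a => a.1)).sum) ((A.map (fun a => a.2)).sum) x + QA A := by
  induction A with
  | nil => simp [fl, QA]
  | cons a A ih =>
      simp only [List.map_cons, List.sum_cons, List.length_cons]
      rw [ih]
      simp only [fl, QA, List.map_cons, List.sum_cons]
      push_cast
      ring

-- the plain (un-modded) weighted telescoping sum A's loop accumulates
def sumT (N nA HA VA : Int) : List ((Int × Int) × (Int × Int)) → Int → Int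
  | [], _ => 0
  | uv :: rest, i =>
      (N - i) * (nA * (uv.2.1 ^ 2 - uv.1.1 ^ 2 + uv.2.2 ^ 2 - uv.1.2 ^ 2)
          - 2 * (uv.2.1 - uv.1.1) * HA - 2 * (uv.2.2 - uv.1.2) * VA)
        + sumT N nA HA VA rest (i + 1)

theorem MOD_pos : (0 : Int) < MOD := by decide

-- dropping the per-term mod only changes the loop value up to congruence mod MOD
theorem solveLoop_modeq (N nA HA VA : Int) (ps : List ((Int × Int) × (Int × Int))) :
    ∀ (out i : Int), (solveLoop N nA HA VA ps (out, i)).1 ≡ out + sumT N nA HA VA ps i [ZMOD MOD] := by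
  induction ps with
  | nil => intro out i; simp [solveLoop, sumT]
  | cons uv rest ih =>
      intro out i
      simp only [solveLoop, sumT]
      refine (ih _ _).trans ?_
      rw [PySem.Int.mod_eq_emod_of_pos MOD_pos, ← add_assoc]
      exact Int.ModEq.add (Int.ModEq.add_left out (Int.emod_emod_of_dvd _ dvd_rfl)) Int.ModEq.rfl

-- telescoping: the weighted consecutive differences recover the per-well sum
theorem sumT_tele (nA HA VA : Int) :
    ∀ (ys : List (Int × Int)) (y : Int × Int) (N i : Int), N - i = (ys.length : Int) →
      sumT N nA HA VA ((y :: ys).zip ys) i + (N - i + 1) * fl nA HA VA y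
        = ((y :: ys).map (fl nA HA VA)).sum := by
  intro ys
  induction ys with
  | nil =>
      intro y N i h
      simp only [List.length_nil, Nat.cast_zero] at h
      simp only [List.zip_nil_right, sumT, List.map_cons, List.map_nil, List.sum_cons,
        List.sum_nil, fl]
      have h1 : N - i + 1 = 1 := by omega
      rw [h1]; ring
  | cons z zs ih =>
      intro y N i h
      simp only [List.length_cons] at h
      have hz : N - (i + 1) = (zs.length : Int) := by push_cast at h ⊢; omega
      have hrec := ih z N (i + 1) hz
      simp only [List.zip_cons_cons, sumT, List.map_cons, List.sum_cons, fl] at hrec ⊢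
      linear_combination hrec

-- B's A-fold computes the three precomputed sums
theorem hvq_spec (A : List (Int × Int)) :
    ∀ (s : Int × Int × Int),
      A.foldl (fun (s : Int × Int × Int) a =>
        (s.1 + a.1, s.2.1 + a.2, s.2.2 + a.1 * a.1 + a.2 * a.2)) s
      = (s.1 + (A.map (fun a => a.1)).sum, s.2.1 + (A.map (fun a => a.2)).sum, s.2.2 + QA A) := by
  induction A with
  | nil => intro s; simp [QA]
  | cons a A ih =>
      intro s
      simp only [List.foldl_cons]
      rw [ih]
      simp only [List.map_cons, List.sum_cons, QA, Prod.mk.injEq]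
      refine ⟨by ring, by ring, by ring⟩

theorem solve_spec' (A X : List (Int × Int)) (h : Pre_solve A X) : solve A X = solve_alt A X := by
  rcases X with _ | ⟨x0, xs⟩
  · rcases h with h | h
    · exact absurd rfl h
    · subst h; decide
  · -- X = x0 :: xs
    set HA := (A.map (fun a => a.1)).sum with hHA
    set VA := (A.map (fun a => a.2)).sum with hVA
    set N : Int := (((x0 :: xs).length : Nat) : Int) with hN
    have hS0 := expand_sum A x0
    have htele := sumT_tele (A.length : Int) HA VA xs x0 N 1 (by simp [hN])
    have hloop := solveLoop_modeq N (A.length : Int) HA VA ((x0 :: xs).zip xs)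
      (PySem.Int.mod (N * (A.map (fun a => (x0.1 - a.1) ^ 2 + (x0.2 - a.2) ^ 2)).sum) MOD) 1
    -- A side reduces to a congruence
    simp only [solve, solve_alt, PySem.List.len_eq, PySem.List.pyGetD_zero_cons,
      List.tail_cons, hvq_spec A (0, 0, 0), zero_add, ← hHA, ← hVA, ← hN]
    rw [PySem.Int.mod_eq_emod_of_pos MOD_pos, PySem.Int.mod_eq_emod_of_pos MOD_pos]
    -- B side: fold to sum
    rw [PySem.List.foldl_add (x0 :: xs)
      (fun x => (A.length : Int) * (x.1 * x.1 + x.2 * x.2) - 2 * x.1 * HA - 2 * x.2 * VA + QA A) 0,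
      zero_add]
    have hmap : ((x0 :: xs).map
        (fun x => (A.length : Int) * (x.1 * x.1 + x.2 * x.2) - 2 * x.1 * HA - 2 * x.2 * VA + QA A)).sum
        = ((x0 :: xs).map (fl (A.length : Int) HA VA)).sum + N * QA A := by
      rw [show (fun x => (A.length : Int) * (x.1 * x.1 + x.2 * x.2) - 2 * x.1 * HA - 2 * x.2 * VA + QA A)
            = (fun x => fl (A.length : Int) HA VA x + QA A) from funext (fun x => by simp only [fl]; ring),
        PySem.List.sum_map_add_int, PySem.List.sum_map_const_int, hN]
    rw [hmap]
    -- both sides are the same residue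
    rw [PySem.Int.mod_eq_emod_of_pos MOD_pos] at hloop
    rw [PySem.Int.mod_eq_emod_of_pos MOD_pos]
    show Int.ModEq MOD _ _
    refine hloop.trans ?_
    have h1 : (N * (A.map (fun a => (x0.1 - a.1) ^ 2 + (x0.2 - a.2) ^ 2)).sum) % MOD
        ≡ N * (A.map (fun a => (x0.1 - a.1) ^ 2 + (x0.2 - a.2) ^ 2)).sum [ZMOD MOD] :=
      Int.emod_emod_of_dvd _ dvd_rfl
    refine (Int.ModEq.add h1 Int.ModEq.rfl).trans ?_
    rw [hS0, ← hHA, ← hVA]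
    have hfin : N * (fl (A.length : Int) HA VA x0 + QA A)
          + sumT N (A.length : Int) HA VA ((x0 :: xs).zip xs) 1
        = ((x0 :: xs).map (fl (A.length : Int) HA VA)).sum + N * QA A := by
      simp only [fl] at htele ⊢
      linear_combination htele
    rw [hfin]

-- ===== VERDICT (by name: the statement is the Claim_ definition above) =====
theorem solve_spec : Claim_equal_solve := by
  intro A X _ hpre
  exact solve_spec' A X hpre
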